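-- pv_equiv track=rewrite | github.com/andeaseme/advent-of-code | 2023/02/solution.py | find_min_pieces_per_color_in_game
-- ===== SOURCE A (Python) =====
-- def find_min_pieces_per_color_in_game(game):
--     min_pieces_per_color = {}
--     for round in game['rounds']:
--         for color, count in round.items():
--             if color not in min_pieces_per_color:
--                 min_pieces_per_color[color] = count
--             else:
--                 min_pieces_per_color[color] = max(min_pieces_per_color[color], count)
--     return min_pieces_per_color
-- ===== SOURCE B (Python) =====
-- def find_min_pieces_per_color_in_game(game):
--     # Gather all counts per color first, then reduce each group with max.
--     grouped = {}
--     for round in game['rounds']: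
--         for color, count in round.items():
--             grouped[color] = grouped.get(color, []) + [count]
--     return {color: max(counts) for color, counts in grouped.items()}
-- ===== Notes on version B (the rewrite author's own statement) =====
-- stated objective: alternative
-- what changed: Instead of maintaining a running per-color max with a membership test inside the nested loops, B first builds a grouping dict color -> list of all its counts in one pass, then reduces each group with max in a separate comprehension.
-- outside the precondition, e.g. on find_min_pieces_per_color_in_game({}): A raises KeyError, B raises KeyError
import Mathlib
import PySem

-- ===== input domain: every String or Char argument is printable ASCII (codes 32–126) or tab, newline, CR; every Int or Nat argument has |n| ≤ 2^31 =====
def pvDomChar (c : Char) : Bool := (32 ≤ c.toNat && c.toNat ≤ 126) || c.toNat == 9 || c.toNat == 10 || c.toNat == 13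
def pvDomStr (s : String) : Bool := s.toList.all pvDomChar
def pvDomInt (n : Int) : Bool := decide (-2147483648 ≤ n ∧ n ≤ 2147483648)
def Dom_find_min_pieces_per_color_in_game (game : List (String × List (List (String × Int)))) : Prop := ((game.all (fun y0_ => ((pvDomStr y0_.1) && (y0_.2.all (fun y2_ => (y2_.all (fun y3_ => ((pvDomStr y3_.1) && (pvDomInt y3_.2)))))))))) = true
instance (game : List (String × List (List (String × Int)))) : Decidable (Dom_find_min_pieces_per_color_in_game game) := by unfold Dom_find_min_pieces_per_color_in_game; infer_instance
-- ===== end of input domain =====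

-- B replaces A's running per-color max (membership test + in-place max update) by a
-- gather-then-reduce decomposition: group all counts per color, then max each group.

-- ===== PORT A =====
-- literal port of A: running-max dict over game['rounds'], returned as its items
def find_min_pieces_per_color_in_game (game : List (String × List (List (String × Int)))) : List (String × Int) :=
  match (PySem.Dict.mk game).get? "rounds" with
  | none => []  -- KeyError in Python: excluded by Pre_
  | some rounds =>
      (rounds.foldl
        (fun (d : PySem.Dict String Int) round =>
          round.foldl
            (fun (d : PySem.Dict String Int) p =>
              if d.contains p.1 = false then d.insert p.1 p.2
              else d.insert p.1 (max (d.getD p.1 0) p.2))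
            d)
        PySem.Dict.empty).items

-- ===== PORT B =====
-- literal port of B: grouping dict color -> all its counts, then max per group
-- (every group is nonempty, so the `.getD 0` default of max? is never used)
def find_min_pieces_per_color_in_game_alt (game : List (String × List (List (String × Int)))) : List (String × Int) :=
  match (PySem.Dict.mk game).get? "rounds" with
  | none => []  -- KeyError in Python: excluded by Pre_
  | some rounds =>
      let grouped : PySem.Dict String (List Int) :=
        rounds.foldl
          (fun (g : PySem.Dict String (List Int)) round =>
            round.foldl
              (fun (g : PySem.Dict String (List Int)) p => g.modify p.1 [] (fun l => l ++ [p.2]))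
              g)
          PySem.Dict.empty
      grouped.items.map (fun kv => (kv.1, (PySem.List.max? kv.2 (fun y => y)).getD 0))

-- ===== PRECONDITION & SPEC =====
-- Pre_ excludes exactly the inputs where Python's game['rounds'] raises KeyError.
def Pre_find_min_pieces_per_color_in_game (game : List (String × List (List (String × Int)))) : Prop :=
  (PySem.Dict.mk game).contains "rounds" = true
instance (game : List (String × List (List (String × Int)))) : Decidable (Pre_find_min_pieces_per_color_in_game game) := by unfold Pre_find_min_pieces_per_color_in_game; infer_instance

def pvWitness_find_min_pieces_per_color_in_game : (List (String × List (List (String × Int)))) :=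
  [("rounds", [[("red", 4), ("blue", 2)], [("red", 1), ("green", 3)]])]

def Spec_find_min_pieces_per_color_in_game (game : List (String × List (List (String × Int)))) (out : List (String × Int)) : Prop := out = find_min_pieces_per_color_in_game_alt game
instance (game : List (String × List (List (String × Int)))) (out : List (String × Int)) : Decidable (Spec_find_min_pieces_per_color_in_game game out) := by unfold Spec_find_min_pieces_per_color_in_game; infer_instance

-- ===== CLAIM (what is proved, stated in full; the proofs are below) =====
def Claim_equal_find_min_pieces_per_color_in_game : Prop := ∀ (game : List (String × List (List (String × Int)))), Dom_find_min_pieces_per_color_in_game game → Pre_find_min_pieces_per_color_in_game game → Spec_find_min_pieces_per_color_in_game game (find_min_pieces_per_color_in_game game)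

-- ===== LEMMAS AND PROOFS =====

-- one optional-max step, as A's loop performs it on the value at one key
def optMaxStep (o : Option Int) (n : Int) : Option Int :=
  some (match o with | none => n | some v => max v n)

-- A's inner update is one insert whose value depends on the branch
lemma stepA_eq_insert (d : PySem.Dict String Int) (p : String × Int) :
    (if d.contains p.1 = false then d.insert p.1 p.2
     else d.insert p.1 (max (d.getD p.1 0) p.2))
    = d.insert p.1 (if d.contains p.1 = false then p.2 else max (d.getD p.1 0) p.2) := by
  split <;> rfl

-- the value A's loop holds at key c is the optional-max fold of the counts filed under c
lemma foldA_get? (ps : List (String × Int)) (d : PySem.Dict String Int) (c : String) :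
    (ps.foldl
       (fun (d : PySem.Dict String Int) p =>
         if d.contains p.1 = false then d.insert p.1 p.2
         else d.insert p.1 (max (d.getD p.1 0) p.2)) d).get? c
    = ((ps.filter (fun p => p.1 == c)).map (fun p => p.2)).foldl optMaxStep (d.get? c) := by
  induction ps generalizing d with
  | nil => rfl
  | cons p ps ih =>
      simp only [List.foldl_cons, ih, List.filter_cons]
      by_cases hc : p.1 = c
      · subst hc
        simp only [beq_self_eq_true, if_pos, List.map_cons, List.foldl_cons]
        congr 1
        rw [stepA_eq_insert, PySem.Dict.get?_insert,
            PySem.Dict.contains_eq_isSome_get?, PySem.Dict.getD_eq_get?_getD]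
        cases d.get? p.1 <;> simp [optMaxStep]
      · have hbe : (p.1 == c) = false := by simp [hc]
        simp only [hbe, Bool.false_eq_true]
        congr 1
        rw [stepA_eq_insert, PySem.Dict.get?_insert,
            if_neg (fun h : c = p.1 => hc h.symm)]

-- an optional-max fold started at `some x` is `some` of the plain running max
lemma foldl_optMaxStep_some (l : List Int) (x : Int) :
    l.foldl optMaxStep (some x) = some (l.foldl max x) := by
  induction l generalizing x with
  | nil => rfl
  | cons y l ih => simp [optMaxStep, ih]

theorem find_min_pieces_per_color_in_game_spec : Claim_equal_find_min_pieces_per_color_in_game := by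
  intro game _ hpre
  unfold Pre_find_min_pieces_per_color_in_game at hpre
  unfold Spec_find_min_pieces_per_color_in_game
  unfold find_min_pieces_per_color_in_game find_min_pieces_per_color_in_game_alt
  rw [PySem.Dict.contains_eq_isSome_get?] at hpre
  cases hr : (PySem.Dict.mk game).get? "rounds" with
  | none => simp [hr] at hpre
  | some rounds =>
      simp only
      -- both nested loops are folds over the flattened pair list
      set ps : List (String × Int) := rounds.flatten with hps
      rw [← List.foldl_flatten, ← List.foldl_flatten, ← hps]
      set dA := ps.foldl
        (fun (d : PySem.Dict String Int) p =>
          if d.contains p.1 = false then d.insert p.1 p.2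
          else d.insert p.1 (max (d.getD p.1 0) p.2)) PySem.Dict.empty with hdA
      set dB := ps.foldl
        (fun (g : PySem.Dict String (List Int)) p => g.modify p.1 [] (fun l => l ++ [p.2]))
        PySem.Dict.empty with hdB
      -- both dicts carry the same keys, in the same (first-seen) order, without duplicates
      have hkA : dA.keys = PySem.Set.ofList (ps.map (fun p => p.1)) := by
        rw [hdA]
        have hfun :
            (fun (d : PySem.Dict String Int) (p : String × Int) =>
              if d.contains p.1 = false then d.insert p.1 p.2
              else d.insert p.1 (max (d.getD p.1 0) p.2))
            = (fun (d : PySem.Dict String Int) (p : String × Int) =>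
              d.insert p.1 (if d.contains p.1 = false then p.2 else max (d.getD p.1 0) p.2)) := by
          funext d p; exact stepA_eq_insert d p
        rw [hfun,
            PySem.Dict.keys_foldl_insert_key ps (fun p => p.1)
              (fun d p => if d.contains p.1 = false then p.2 else max (d.getD p.1 0) p.2)
              PySem.Dict.empty]
        rfl
      have hkB : dB.keys = PySem.Set.ofList (ps.map (fun p => p.1)) := by
        rw [hdB,
            PySem.Dict.keys_foldl_modify_key ps (fun p => p.1) []
              (fun _ p l => l ++ [p.2]) PySem.Dict.empty]
        rfl
      have hndA : dA.keys.Nodup := by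
        rw [hkA]; exact PySem.Set.nodup_ofList _
      have hndB : dB.keys.Nodup := by
        rw [hkB]; exact PySem.Set.nodup_ofList _
      -- read both results off their key lists
      rw [PySem.Dict.items_eq_map_keys dA hndA 0,
          PySem.Dict.items_eq_map_keys dB hndB [], List.map_map]
      rw [hkA, hkB]
      refine List.map_congr_left ?_
      intro k hk
      rw [PySem.Set.mem_ofList] at hk
      simp only [Function.comp]
      -- the counts filed under k are nonempty, since k occurs in ps
      have hne : (ps.filter (fun p => p.1 == k)).map (fun p => p.2) ≠ [] := by
        simp only [ne_eq, List.map_eq_nil_iff, List.filter_eq_nil_iff, not_forall]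
        rcases List.mem_map.mp hk with ⟨p, hp, hpk⟩
        exact ⟨p, hp, by simp [hpk]⟩
      cases hcs : (ps.filter (fun p => p.1 == k)).map (fun p => p.2) with
      | nil => exact absurd hcs hne
      | cons x t =>
          have hA : dA.getD k 0 = t.foldl max x := by
            rw [PySem.Dict.getD_eq_get?_getD, hdA, foldA_get?, hcs]
            simp [optMaxStep, foldl_optMaxStep_some]
          have hB : dB.getD k [] = x :: t := by
            rw [hdB, PySem.Dict.getD_foldl_modify_append, hcs]
            rfl
          rw [hA, hB, PySem.List.max?_id_cons]
          rfl
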